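-- pv_equiv track=rewrite | github.com/teodutu/SIS | Labs/Lab2/password-breaking/cracking-scripts/extended_breaking.py | gen_subst
-- ===== SOURCE A (Python) =====
-- from copy import deepcopy
--
-- SUBST = {'a': '@', 'e': '3', 'i': '!', 'o': '0', 's': '$'}
--
-- PUNCTUATION = ['.', '...', '!', '?']
--
-- def gen_subst(string):
--     subst = ['']
--     for c in string:
--         subst = [s + c for s in subst]
--         if c in SUBST:
--             subst += [s[:-1] + SUBST[c] for s in subst]
--
--     subst_punct = deepcopy(subst)
--     for s in subst:
--         subst_punct += [s + p for p in PUNCTUATION];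
--
--     return subst_punct
-- ===== SOURCE B (Python) =====
-- SUBST = {'a': '@', 'e': '3', 'i': '!', 'o': '0', 's': '$'}
--
-- PUNCTUATION = ['.', '...', '!', '?']
--
-- def gen_subst(string):
--     k = sum(1 for c in string if c in SUBST)
--     subst = []
--     for i in range(2 ** k):
--         bits = i
--         out = []
--         for c in string:
--             if c in SUBST:
--                 out.append(SUBST[c] if bits & 1 else c)
--                 bits >>= 1
--             else:
--                 out.append(c)
--         subst.append(''.join(out))
--     return subst + [s + p for s in subst for p in PUNCTUATION]
-- ===== Notes on version B (the rewrite author's own statement) =====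
-- stated objective: alternative
-- what changed: Replaces A's incremental list-doubling fold (duplicate the candidate list at each substitutable char) with direct bitmask enumeration: for each i in range(2**k) one scan of the string builds the candidate by consuming the mask's bits, then punctuation suffixes are added by a flat comprehension instead of an accumulating loop.
import Mathlib
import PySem

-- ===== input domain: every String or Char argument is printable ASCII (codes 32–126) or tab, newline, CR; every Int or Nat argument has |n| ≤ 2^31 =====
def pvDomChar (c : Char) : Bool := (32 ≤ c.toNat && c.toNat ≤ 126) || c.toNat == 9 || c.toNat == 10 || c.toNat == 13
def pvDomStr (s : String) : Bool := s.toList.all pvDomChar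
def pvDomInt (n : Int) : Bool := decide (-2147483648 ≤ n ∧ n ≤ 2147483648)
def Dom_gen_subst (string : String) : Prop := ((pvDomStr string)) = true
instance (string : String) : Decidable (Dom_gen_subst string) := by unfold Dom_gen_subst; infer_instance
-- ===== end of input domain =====

-- B replaces A's incremental list-doubling with a direct bitmask enumeration: one string is
-- built per mask i < 2^k by a single scan consuming the mask's bits (objective: alternative).

-- shared module constants: SUBST (as a lookup returning Option) and PUNCTUATION (as char lists)
def pvSub? (c : Char) : Option Char :=
  match c with
  | 'a' => some '@'
  | 'e' => some '3'
  | 'i' => some '!'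
  | 'o' => some '0'
  | 's' => some '$'
  | _ => none

def pvPunct : List (List Char) := [['.'], ['.', '.', '.'], ['!'], ['?']]

-- ===== PORT A =====
def gen_subst (string : String) : List String :=
  let subst : List (List Char) := string.toList.foldl (fun subst c =>
    let subst := subst.map (fun s => s ++ [c])
    match pvSub? c with
    | some r => subst ++ subst.map (fun s => PySem.List.slice s none (some (-1)) ++ [r])
    | none => subst) [[]]
  -- subst_punct = deepcopy(subst); for s in subst: subst_punct += [s + p for p in PUNCTUATION]
  let subst_punct := subst.foldl (fun acc s => acc ++ pvPunct.map (fun p => s ++ p)) subst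
  subst_punct.map (fun s => String.ofList s)

-- ===== PORT B =====
def gen_subst_alt (string : String) : List String :=
  let cs := string.toList
  let k := cs.countP (fun c => (pvSub? c).isSome)
  let subst := (List.range (2 ^ k)).map (fun i =>
    (cs.foldl (fun (st : List Char × Nat) c =>
      match pvSub? c with
      | some r => (st.1 ++ [if st.2 % 2 = 1 then r else c], st.2 / 2)
      | none => (st.1 ++ [c], st.2)) ([], i)).1)
  (subst ++ subst.flatMap (fun s => pvPunct.map (fun p => s ++ p))).map (fun s => String.ofList s)

-- ===== PRECONDITION & SPEC =====
def Spec_gen_subst (string : String) (out : List String) : Prop := out = gen_subst_alt string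
instance (string : String) (out : List String) : Decidable (Spec_gen_subst string out) := by unfold Spec_gen_subst; infer_instance

-- ===== CLAIM (what is proved, stated in full; the proofs are below) =====
def Claim_equal_gen_subst : Prop := ∀ (string : String), Dom_gen_subst string → Spec_gen_subst string (gen_subst string)

-- ===== LEMMAS AND PROOFS =====

-- reference builder: apply mask m to cs, consuming one low bit per substitutable char
def pvBld : List Char → Nat → List Char
  | [], _ => []
  | c :: cs, m =>
    match pvSub? c with
    | some r => (if m % 2 = 1 then r else c) :: pvBld cs (m / 2)
    | none => c :: pvBld cs m

def pvCnt (cs : List Char) : Nat := cs.countP (fun c => (pvSub? c).isSome)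

-- B's inner scan computes pvBld
theorem pvB_fold (cs : List Char) (acc : List Char) (m : Nat) :
    (cs.foldl (fun (st : List Char × Nat) c =>
      match pvSub? c with
      | some r => (st.1 ++ [if st.2 % 2 = 1 then r else c], st.2 / 2)
      | none => (st.1 ++ [c], st.2)) (acc, m)).1 = acc ++ pvBld cs m := by
  induction cs generalizing acc m with
  | nil => simp [pvBld]
  | cons c cs ih =>
    cases h : pvSub? c with
    | some r => simp [List.foldl_cons, h, ih, pvBld]
    | none => simp [List.foldl_cons, h, ih, pvBld]

theorem pvBld_append (xs ys : List Char) (m : Nat) :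
    pvBld (xs ++ ys) m = pvBld xs m ++ pvBld ys (m / 2 ^ pvCnt xs) := by
  induction xs generalizing m with
  | nil => simp [pvBld, pvCnt]
  | cons c xs ih =>
    cases h : pvSub? c with
    | some r =>
      simp only [List.cons_append, pvBld, ih, pvCnt, List.countP_cons, h, Option.isSome_some]
      simp [Nat.div_div_eq_div_mul, pow_succ, Nat.mul_comm]
    | none =>
      simp [pvBld, h, ih, pvCnt]

theorem pvBld_add_high (cs : List Char) (m t : Nat) :
    pvBld cs (m + 2 ^ pvCnt cs * t) = pvBld cs m := by
  induction cs generalizing m t with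
  | nil => simp [pvBld]
  | cons c cs ih =>
    cases h : pvSub? c with
    | some r =>
      have hk : pvCnt (c :: cs) = pvCnt cs + 1 := by simp [pvCnt, h]
      have h2 : 2 ^ (pvCnt cs + 1) * t = 2 * (2 ^ pvCnt cs * t) := by ring
      simp only [pvBld, h, hk, h2]
      rw [Nat.add_mul_mod_self_left, Nat.add_mul_div_left _ _ (by norm_num : 0 < 2)]
      simp [ih]
    | none =>
      have hk : pvCnt (c :: cs) = pvCnt cs := by simp [pvCnt, h]
      simp [pvBld, h, hk, ih]

-- bld over a single trailing non-substitutable char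
theorem pvBld_single_none {c : Char} (h : pvSub? c = none) (m : Nat) :
    pvBld [c] m = [c] := by simp [pvBld, h]

theorem pvBld_single_some {c r : Char} (h : pvSub? c = some r) (m : Nat) :
    pvBld [c] m = [if m % 2 = 1 then r else c] := by simp [pvBld, h]

-- A's loop produces exactly the mask enumeration
theorem pvA_fold (cs : List Char) :
    cs.foldl (fun subst c =>
      let subst := subst.map (fun s => s ++ [c])
      match pvSub? c with
      | some r => subst ++ subst.map (fun s => PySem.List.slice s none (some (-1)) ++ [r])
      | none => subst) [[]]
    = (List.range (2 ^ pvCnt cs)).map (pvBld cs) := by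
  induction cs using List.reverseRecOn with
  | nil => simp [pvCnt, pvBld]
  | append_singleton xs c ih =>
    rw [List.foldl_append, ih]
    cases h : pvSub? c with
    | none =>
      have hk : pvCnt (xs ++ [c]) = pvCnt xs := by
        simp [pvCnt, List.countP_append, h]
      simp only [List.foldl_cons, List.foldl_nil, h, hk, List.map_map]
      refine List.map_congr_left ?_
      intro m hm
      simp [Function.comp, pvBld_append, pvBld_single_none h]
    | some r =>
      have hk : pvCnt (xs ++ [c]) = pvCnt xs + 1 := by
        simp [pvCnt, List.countP_append, h]
      simp only [List.foldl_cons, List.foldl_nil, h, hk, List.map_map]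
      rw [pow_succ, Nat.mul_comm, Nat.two_mul, List.range_add, List.map_append, List.map_map]
      congr 1
      · refine List.map_congr_left ?_
        intro m hm
        have hm' : m < 2 ^ pvCnt xs := List.mem_range.mp hm
        simp [Function.comp, pvBld_append, pvBld_single_some h,
          Nat.div_eq_of_lt hm']
      · refine List.map_congr_left ?_
        intro m hm
        have hm' : m < 2 ^ pvCnt xs := List.mem_range.mp hm
        have hb : pvBld xs (2 ^ pvCnt xs + m) = pvBld xs m := by
          have := pvBld_add_high xs m 1
          simpa [Nat.add_comm] using this
        have hd : (2 ^ pvCnt xs + m) / 2 ^ pvCnt xs = 1 := by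
          rw [Nat.add_comm, Nat.add_div_right _ (Nat.two_pow_pos _),
            Nat.div_eq_of_lt hm']
        simp [Function.comp, pvBld_append, pvBld_single_some h, hb, hd,
          PySem.List.slice_to_neg_one]

-- ===== VERDICT (by name: the statement is the Claim_ definition above) =====
theorem gen_subst_spec : Claim_equal_gen_subst := by
  intro string _
  show gen_subst string = gen_subst_alt string
  have h1 : ∀ i : Nat, (string.toList.foldl (fun (st : List Char × Nat) c =>
      match pvSub? c with
      | some r => (st.1 ++ [if st.2 % 2 = 1 then r else c], st.2 / 2)
      | none => (st.1 ++ [c], st.2)) ([], i)).1 = pvBld string.toList i := by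
    intro i; simpa using pvB_fold string.toList [] i
  unfold gen_subst gen_subst_alt
  simp only [pvA_fold string.toList, PySem.List.foldl_append_eq_flatMap, h1]
  rfl
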